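-- pv_equiv track=rewrite | github.com/seecr/seecr-license | seecrlicense/copyrightset.py | _serializeYears
-- ===== SOURCE A (Python) =====
-- def _serializeYears(years):
--     intervals = []
--     for year in sorted(years):
--         if len(intervals) == 0 or year > intervals[-1]["end"] + 1:
--             intervals.append({"start": year})
--         intervals[-1]["end"] = year
--     return ", ".join(
--         "-".join(str(y) for y in sorted(set(interval.values())))
--         for interval in intervals
--     )
-- ===== SOURCE B (Python) =====
-- def _serializeYears(years):
--     s = set(years)
--     starts = sorted(y for y in s if y - 1 not in s)
--     ends = sorted(y for y in s if y + 1 not in s)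
--     return ", ".join(
--         str(a) if a == b else "%s-%s" % (a, b) for a, b in zip(starts, ends)
--     )
-- ===== Notes on version B (the rewrite author's own statement) =====
-- stated objective: alternative
-- what changed: Replaces A's sorted linear sweep that grows interval dicts with a set-membership boundary detection: run starts are years y with y-1 not in the set, run ends are years y with y+1 not in the set; the two sorted boundary lists are zipped and formatted (measured ~2x faster: no per-element dict building).
import Mathlib
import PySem

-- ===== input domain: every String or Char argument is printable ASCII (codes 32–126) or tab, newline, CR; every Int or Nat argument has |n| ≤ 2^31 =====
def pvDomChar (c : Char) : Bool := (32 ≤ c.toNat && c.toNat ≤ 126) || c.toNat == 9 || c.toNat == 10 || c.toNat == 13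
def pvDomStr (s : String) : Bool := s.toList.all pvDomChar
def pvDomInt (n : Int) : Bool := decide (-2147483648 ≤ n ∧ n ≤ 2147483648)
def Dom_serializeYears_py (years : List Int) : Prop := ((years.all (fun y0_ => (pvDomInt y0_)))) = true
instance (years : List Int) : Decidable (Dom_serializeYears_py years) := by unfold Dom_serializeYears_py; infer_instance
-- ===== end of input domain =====

-- B replaces A's interval-building sweep with set-membership boundary detection (run starts: y-1 not in the set; run ends: y+1 not in the set), zipping the two sorted boundary lists (objective: alternative).

-- ===== PORT A =====
-- one loop step of A: maybe append a fresh {"start": year} dict, then intervals[-1]["end"] = year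
def pvStepA (intervals : List (PySem.Dict String Int)) (year : Int) : List (PySem.Dict String Int) :=
  let intervals :=
    if intervals.length = 0 ∨
        year > ((intervals.getLast?.getD PySem.Dict.empty).getD "end" 0) + 1 then
      intervals ++ [PySem.Dict.empty.insert "start" year]
    else intervals
  match intervals.getLast? with
  | some d => intervals.dropLast ++ [d.insert "end" year]
  | none => intervals   -- unreachable: intervals is nonempty here

def serializeYears_py (years : List Int) : String :=
  let intervals := (PySem.List.sorted years (fun y => y) false).foldl pvStepA []
  PySem.Str.join ", "
    (intervals.map (fun interval =>
      PySem.Str.join "-"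
        ((PySem.List.sorted (PySem.Set.ofList (PySem.Dict.values interval)) (fun y => y) false).map
          PySem.Int.toStr)))

-- ===== PORT B =====
-- str(a) if a == b else "%s-%s" % (a, b)
def pvFmtB (p : Int × Int) : String :=
  if p.1 = p.2 then PySem.Int.toStr p.1 else PySem.Int.toStr p.1 ++ "-" ++ PySem.Int.toStr p.2

def serializeYears_py_alt (years : List Int) : String :=
  let s := PySem.Set.ofList years
  let starts := PySem.List.sorted (s.filter (fun y => !(PySem.Set.contains s (y - 1)))) (fun y => y) false
  let ends := PySem.List.sorted (s.filter (fun y => !(PySem.Set.contains s (y + 1)))) (fun y => y) false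
  PySem.Str.join ", " ((starts.zip ends).map pvFmtB)

-- ===== PRECONDITION & SPEC =====
def Spec_serializeYears_py (years : List Int) (out : String) : Prop := out = serializeYears_py_alt years
instance (years : List Int) (out : String) : Decidable (Spec_serializeYears_py years out) := by unfold Spec_serializeYears_py; infer_instance

-- ===== CLAIM (what is proved, stated in full; the proofs are below) =====
def Claim_equal_serializeYears_py : Prop := ∀ (years : List Int), Dom_serializeYears_py years → Spec_serializeYears_py years (serializeYears_py years)

-- ===== LEMMAS AND PROOFS =====

-- the interval dict {"start": a, "end": b}
def pvMkD (a b : Int) : PySem.Dict String Int := (PySem.Dict.empty.insert "start" a).insert "end" b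

-- the run structure A's fold builds: current run (a, b), remaining years
def pvRunsGo (a b : Int) : List Int → List (Int × Int)
  | [] => [(a, b)]
  | y :: ys => if b + 1 < y then (a, b) :: pvRunsGo y y ys else pvRunsGo a y ys

def pvRuns1 : List Int → List (Int × Int)
  | [] => []
  | y :: ys => pvRunsGo y y ys

-- remove duplicates from an ascending list, given the previous element b
def pvAscDedup (b : Int) : List Int → List Int
  | [] => []
  | y :: ys => if y = b then pvAscDedup b ys else y :: pvAscDedup y ys

def pvFmtA (p : Int × Int) : String :=
  PySem.Str.join "-"
    ((PySem.List.sorted (PySem.Set.ofList (PySem.Dict.values (pvMkD p.1 p.2))) (fun y => y) false).map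
      PySem.Int.toStr)

theorem pvStepA_last (acc : List (PySem.Dict String Int)) (a b y : Int) :
    pvStepA (acc ++ [pvMkD a b]) y =
      if b + 1 < y then acc ++ [pvMkD a b, pvMkD y y] else acc ++ [pvMkD a y] := by
  by_cases h : b + 1 < y
  · simp only [pvStepA, pvMkD, List.getLast?_concat, Option.getD_some, PySem.Dict.getD_insert_self]
    rw [if_pos (Or.inr h), if_pos h]
    simp [List.append_assoc]
  · simp only [pvStepA, pvMkD, List.getLast?_concat, Option.getD_some, PySem.Dict.getD_insert_self]
    rw [if_neg (by simp; omega), if_neg h]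
    simp [PySem.Dict.insert_insert_self]

theorem pvFoldA (ys : List Int) : ∀ (acc : List (PySem.Dict String Int)) (a b : Int),
    ys.foldl pvStepA (acc ++ [pvMkD a b]) = acc ++ (pvRunsGo a b ys).map (fun p => pvMkD p.1 p.2) := by
  induction ys with
  | nil => intro acc a b; simp [pvRunsGo]
  | cons y ys ih =>
    intro acc a b
    simp only [List.foldl_cons, pvStepA_last, pvRunsGo]
    by_cases h : b + 1 < y
    · rw [if_pos h, if_pos h]
      have : acc ++ [pvMkD a b, pvMkD y y] = (acc ++ [pvMkD a b]) ++ [pvMkD y y] := by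
        simp [List.append_assoc]
      rw [this, ih]
      simp [List.append_assoc]
    · rw [if_neg h, if_neg h, ih]

theorem pvA_eq (years : List Int) :
    serializeYears_py years =
      PySem.Str.join ", " ((pvRuns1 (PySem.List.sorted years (fun y => y) false)).map pvFmtA) := by
  unfold serializeYears_py
  cases hs : PySem.List.sorted years (fun y => y) false with
  | nil => simp [pvRuns1]
  | cons y ys =>
    simp only [List.foldl_cons]
    have h0 : pvStepA [] y = [] ++ [pvMkD y y] := rfl
    rw [h0, pvFoldA]
    simp only [pvRuns1, List.nil_append, List.map_map]
    rfl

theorem pvRunsGo_ascDedup (l : List Int) : ∀ (a b : Int),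
    pvRunsGo a b l = pvRunsGo a b (pvAscDedup b l) := by
  induction l with
  | nil => intro a b; simp [pvAscDedup]
  | cons y ys ih =>
    intro a b
    simp only [pvAscDedup]
    by_cases h : y = b
    · subst h
      rw [if_pos rfl]
      have hne : ¬ (y + 1 < y) := by omega
      simp only [pvRunsGo, if_neg hne]
      exact ih a y
    · rw [if_neg h]
      simp only [pvRunsGo]
      by_cases h2 : b + 1 < y
      · rw [if_pos h2, if_pos h2, ih y y]
      · rw [if_neg h2, if_neg h2, ih a y]

theorem pvAscDedup_mem (l : List Int) : ∀ (b : Int), l.Pairwise (· ≤ ·) → (∀ x ∈ l, b ≤ x) →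
    ∀ x, x ∈ pvAscDedup b l ↔ (x ∈ l ∧ x ≠ b) := by
  induction l with
  | nil => intro b _ _ x; simp [pvAscDedup]
  | cons y ys ih =>
    intro b hp hb x
    have hy : ∀ z ∈ ys, y ≤ z := (List.pairwise_cons.mp hp).1
    simp only [pvAscDedup]
    by_cases h : y = b
    · subst h
      rw [if_pos rfl]
      rw [ih y (List.pairwise_cons.mp hp).2 hy x]
      constructor
      · rintro ⟨h1, h2⟩; exact ⟨List.mem_cons_of_mem _ h1, h2⟩
      · rintro ⟨h1, h2⟩
        rcases List.mem_cons.mp h1 with h3 | h3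
        · exact absurd h3 h2
        · exact ⟨h3, h2⟩
    · have hby : b < y := lt_of_le_of_ne (hb y (List.mem_cons_self)) (fun e => h e.symm)
      rw [if_neg h]
      rw [List.mem_cons, ih y (List.pairwise_cons.mp hp).2 hy x]
      constructor
      · rintro (h1 | ⟨h1, _⟩)
        · subst h1; exact ⟨List.mem_cons_self, h⟩
        · refine ⟨List.mem_cons_of_mem _ h1, ?_⟩
          have := hy x h1
          omega
      · rintro ⟨h1, h2⟩
        rcases List.mem_cons.mp h1 with h3 | h3
        · exact Or.inl h3
        · by_cases h4 : x = y
          · exact Or.inl h4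
          · exact Or.inr ⟨h3, h4⟩

theorem pvAscDedup_pairwise (l : List Int) : ∀ (b : Int), l.Pairwise (· ≤ ·) → (∀ x ∈ l, b ≤ x) →
    (b :: pvAscDedup b l).Pairwise (· < ·) := by
  induction l with
  | nil => intro b _ _; simp [pvAscDedup]
  | cons y ys ih =>
    intro b hp hb
    have hy : ∀ z ∈ ys, y ≤ z := (List.pairwise_cons.mp hp).1
    have htail := (List.pairwise_cons.mp hp).2
    simp only [pvAscDedup]
    by_cases h : y = b
    · subst h
      rw [if_pos rfl]
      exact ih y htail hy
    · have hby : b < y := lt_of_le_of_ne (hb y (List.mem_cons_self)) (fun e => h e.symm)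
      rw [if_neg h]
      have hrest := ih y htail hy
      apply List.pairwise_cons.mpr
      refine ⟨?_, hrest⟩
      intro z hz
      rcases List.mem_cons.mp hz with h1 | h1
      · omega
      · have h2 : z ∈ ys ∧ z ≠ y := (pvAscDedup_mem ys y htail hy z).mp h1
        have := hy z h2.1
        omega

theorem pvRunsGo_fst_le_snd (l : List Int) : ∀ (a b : Int), a ≤ b → l.Pairwise (· ≤ ·) →
    (∀ x ∈ l, b ≤ x) → ∀ p ∈ pvRunsGo a b l, p.1 ≤ p.2 := by
  induction l with
  | nil =>
    intro a b hab _ _ p hp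
    simp only [pvRunsGo, List.mem_singleton] at hp
    subst hp; exact hab
  | cons y ys ih =>
    intro a b hab hp hb p hmem
    have hy : ∀ z ∈ ys, y ≤ z := (List.pairwise_cons.mp hp).1
    have htail := (List.pairwise_cons.mp hp).2
    have hby : b ≤ y := hb y (List.mem_cons_self)
    simp only [pvRunsGo] at hmem
    by_cases h : b + 1 < y
    · rw [if_pos h] at hmem
      rcases List.mem_cons.mp hmem with h1 | h1
      · subst h1; exact hab
      · exact ih y y le_rfl htail hy p h1
    · rw [if_neg h] at hmem
      exact ih a y (le_trans hab hby) htail hy p hmem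

-- !(l.contains x) as membership
theorem pvNotContains (l : List Int) (x : Int) (h : x ∉ l) : (!(l.contains x)) = true := by
  simp [h]

theorem pvMemContains (l : List Int) (x : Int) (h : x ∈ l) : (!(l.contains x)) = false := by
  simp [h]

-- the boundary characterisation of A's runs: over a strictly ascending b :: l, the runs of the
-- fold are exactly the zip of the elements with no predecessor and the elements with no successor
theorem pvZipRuns (l : List Int) : ∀ (a b : Int), (b :: l).Pairwise (· < ·) →
    pvRunsGo a b l =
      (a :: l.filter (fun y => !((b :: l).contains (y - 1)))).zip
        ((b :: l).filter (fun y => !(l.contains (y + 1)))) := by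
  induction l with
  | nil => intro a b _; simp [pvRunsGo]
  | cons y t ih =>
    intro a b hp
    have hby : b < y := (List.pairwise_cons.mp hp).1 y List.mem_cons_self
    have htp : (y :: t).Pairwise (· < ·) := (List.pairwise_cons.mp hp).2
    have hyt : ∀ z ∈ t, y < z := (List.pairwise_cons.mp htp).1
    -- membership of z - 1 for z ∈ t does not see b (z - 1 ≥ y > b)
    have hStail : ∀ z ∈ t, (!((b :: y :: t).contains (z - 1))) = (!((y :: t).contains (z - 1))) := by
      intro z hz
      have hzy := hyt z hz
      simp only [List.contains_cons]
      have hzb : (z - 1 == b) = false := by simp; omega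
      rw [hzb, Bool.false_or]
    -- membership of z + 1 for z ∈ y :: t does not see y (z + 1 > y)
    have hEtail : ∀ z ∈ y :: t, (!((y :: t).contains (z + 1))) = (!(t.contains (z + 1))) := by
      intro z hz
      have hzy : y ≤ z := by
        rcases List.mem_cons.mp hz with h1 | h1
        · omega
        · have := hyt z h1; omega
      simp only [List.contains_cons]
      have hzb : (z + 1 == y) = false := by simp; omega
      rw [hzb, Bool.false_or]
    simp only [pvRunsGo]
    by_cases h : b + 1 < y
    · -- new run: y is a start (y - 1 ∉), b is an end (b + 1 ∉)
      have hyS : (!((b :: y :: t).contains (y - 1))) = true := by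
        apply pvNotContains
        intro hmem
        rcases List.mem_cons.mp hmem with h1 | h1
        · omega
        rcases List.mem_cons.mp h1 with h2 | h2
        · omega
        · have := hyt _ h2; omega
      have hbE : (!((y :: t).contains (b + 1))) = true := by
        apply pvNotContains
        intro hmem
        rcases List.mem_cons.mp hmem with h1 | h1
        · omega
        · have := hyt _ h1; omega
      rw [if_pos h, ih y y htp,
          List.filter_cons_of_pos (p := fun z => !((b :: y :: t).contains (z - 1))) hyS,
          List.filter_congr hStail,
          List.filter_cons_of_pos (p := fun z => !((y :: t).contains (z + 1))) hbE,
          List.filter_congr hEtail, List.zip_cons_cons]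
    · -- run continues: y - 1 = b, so y is no start and b is no end
      have hyb : y = b + 1 := by omega
      have hyS : (!((b :: y :: t).contains (y - 1))) = false :=
        pvMemContains _ _ (List.mem_cons.mpr (Or.inl (by omega)))
      have hbE : (!((y :: t).contains (b + 1))) = false :=
        pvMemContains _ _ (List.mem_cons.mpr (Or.inl (by omega)))
      rw [if_neg h, ih a y htp,
          List.filter_cons_of_neg (p := fun z => !((b :: y :: t).contains (z - 1))) (ne_true_of_eq_false hyS),
          List.filter_congr hStail,
          List.filter_cons_of_neg (p := fun z => !((y :: t).contains (z + 1))) (ne_true_of_eq_false hbE),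
          List.filter_congr hEtail]

theorem pvJoin_singleton (sep s : String) : PySem.Str.join sep [s] = s := by
  apply String.ext
  rw [PySem.Str.toList_join]
  simp [PySem.Chars.join_singleton]

theorem pvJoin_pair (sep s t : String) : PySem.Str.join sep [s, t] = s ++ sep ++ t := by
  apply String.ext
  rw [PySem.Str.toList_join]
  simp [PySem.Chars.join_cons_cons, PySem.Chars.join_singleton]

theorem pvFmtA_eq_fmtB (a b : Int) (hab : a ≤ b) : pvFmtA (a, b) = pvFmtB (a, b) := by
  unfold pvFmtA pvFmtB
  have hv : PySem.Dict.values (pvMkD a b) = [a, b] := rfl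
  simp only [hv]
  by_cases h : a = b
  · subst h
    have h1 : PySem.Set.ofList [a, a] = [a] := by
      simp [PySem.Set.ofList, PySem.Set.add, PySem.Set.contains]
    rw [h1, PySem.List.sorted_eq_self_of_pairwise _ _ (by simp)]
    simp only [List.map_cons, List.map_nil]
    exact pvJoin_singleton _ _
  · have h1 : PySem.Set.ofList [a, b] = [a, b] := by
      simp [PySem.Set.ofList, PySem.Set.add, PySem.Set.contains, Ne.symm h]
    rw [h1, PySem.List.sorted_eq_self_of_pairwise _ _ (by simp [hab])]
    simp only [List.map_cons, List.map_nil, if_neg h]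
    exact pvJoin_pair _ _ _

theorem pvSortedSet (years : List Int) (y : Int) (ys : List Int)
    (hs : PySem.List.sorted years (fun x => x) false = y :: ys) :
    PySem.List.sorted (PySem.Set.ofList years) (fun x => x) false = y :: pvAscDedup y ys := by
  have hp : (y :: ys).Pairwise (· ≤ ·) := by
    have := PySem.List.sorted_pairwise years (fun x => x)
    rw [hs] at this
    simpa using this
  have hy : ∀ z ∈ ys, y ≤ z := (List.pairwise_cons.mp hp).1
  have htail := (List.pairwise_cons.mp hp).2
  have hlt : (y :: pvAscDedup y ys).Pairwise (· < ·) := pvAscDedup_pairwise ys y htail hy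
  have hnd1 : (y :: pvAscDedup y ys).Nodup := hlt.imp ne_of_lt
  have hmem : ∀ x, x ∈ y :: pvAscDedup y ys ↔ x ∈ PySem.Set.ofList years := by
    intro x
    rw [List.mem_cons, pvAscDedup_mem ys y htail hy x, PySem.Set.mem_ofList]
    have hsy : x ∈ years ↔ x ∈ y :: ys := by
      rw [← hs]; exact (PySem.List.mem_sorted years (fun x => x) false x).symm
    rw [hsy, List.mem_cons]
    constructor
    · rintro (h1 | ⟨h1, _⟩)
      · exact Or.inl h1
      · exact Or.inr h1
    · rintro (h1 | h1)
      · exact Or.inl h1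
      · by_cases h2 : x = y
        · exact Or.inl h2
        · exact Or.inr ⟨h1, h2⟩
  have hperm : (y :: pvAscDedup y ys).Perm (PySem.Set.ofList years) :=
    (List.perm_ext_iff_of_nodup hnd1 (PySem.Set.nodup_ofList years)).mpr hmem
  exact PySem.List.sorted_eq_of_perm_of_pairwise_lt _ _ _ hperm hlt

-- sorting a filtered set is filtering the sorted set (when the sorted set is strictly ascending)
theorem pvSortedFilter (s : List Int) (p : Int → Bool)
    (h : (PySem.List.sorted s (fun x => x) false).Pairwise (· < ·)) :
    PySem.List.sorted (s.filter p) (fun x => x) false =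
      (PySem.List.sorted s (fun x => x) false).filter p := by
  apply PySem.List.sorted_eq_of_perm_of_pairwise_lt
  · exact List.Perm.filter p (PySem.List.sorted_perm s (fun x => x) false)
  · exact List.Pairwise.filter p h

-- ===== VERDICT (by name: the statement is the Claim_ definition above) =====
theorem serializeYears_py_spec : Claim_equal_serializeYears_py := by
  intro years _
  unfold Spec_serializeYears_py
  cases hs : PySem.List.sorted years (fun y => y) false with
  | nil =>
    have hy : years = [] := (PySem.List.sorted_eq_nil_iff _ _ _).mp hs
    subst hy
    rfl
  | cons y ys0 =>
    rw [pvA_eq years, hs]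
    have hp : (y :: ys0).Pairwise (· ≤ ·) := by
      have := PySem.List.sorted_pairwise years (fun x => x)
      rw [hs] at this
      simpa using this
    have hy0 : ∀ z ∈ ys0, y ≤ z := (List.pairwise_cons.mp hp).1
    have htail := (List.pairwise_cons.mp hp).2
    have hsets : PySem.List.sorted (PySem.Set.ofList years) (fun x => x) false
        = y :: pvAscDedup y ys0 := pvSortedSet years y ys0 hs
    have hlt : (y :: pvAscDedup y ys0).Pairwise (· < ·) := pvAscDedup_pairwise ys0 y htail hy0
    have hltS : (PySem.List.sorted (PySem.Set.ofList years) (fun x => x) false).Pairwise (· < ·) := by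
      rw [hsets]; exact hlt
    -- B's boundary lists are filters of the sorted deduplicated list
    simp only [serializeYears_py_alt]
    rw [pvSortedFilter _ _ hltS, pvSortedFilter _ _ hltS, hsets]
    set ds := pvAscDedup y ys0 with hds
    have hdy : ∀ z ∈ ds, y < z := (List.pairwise_cons.mp hlt).1
    -- contains over the set equals contains over the sorted set
    have hcont : ∀ x : Int, PySem.Set.contains (PySem.Set.ofList years) x
        = ((y :: ds).contains x) := by
      intro x
      rw [Bool.eq_iff_iff]
      simp only [PySem.Set.contains, List.contains_iff_mem]
      rw [← hsets, PySem.List.mem_sorted]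
    have hSpred : ∀ z : Int,
        (!(PySem.Set.contains (PySem.Set.ofList years) (z - 1))) = (!((y :: ds).contains (z - 1))) := by
      intro z; rw [hcont]
    have hEpred : ∀ z ∈ y :: ds,
        (!(PySem.Set.contains (PySem.Set.ofList years) (z + 1))) = (!(ds.contains (z + 1))) := by
      intro z hz
      rw [hcont]
      have hzy : y ≤ z := by
        rcases List.mem_cons.mp hz with h1 | h1
        · omega
        · have := hdy z h1; omega
      simp only [List.contains_cons]
      have hzb : (z + 1 == y) = false := by simp; omega
      rw [hzb, Bool.false_or]
    rw [List.filter_congr (fun z _ => hSpred z), List.filter_congr hEpred]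
    -- y itself is kept in the starts filter (y - 1 is below every element)
    have hyS : (!((y :: ds).contains (y - 1))) = true := by
      apply pvNotContains
      intro hmem
      rcases List.mem_cons.mp hmem with h1 | h1
      · omega
      · have := hdy _ h1; omega
    rw [List.filter_cons_of_pos (p := fun z => !((y :: ds).contains (z - 1))) hyS]
    rw [← pvZipRuns ds y y hlt]
    -- A's runs over the sorted list equal the runs over the deduplicated list
    simp only [pvRuns1]
    rw [pvRunsGo_ascDedup ys0 y y, ← hds]
    -- per-run formatting agrees since each run has start ≤ end
    congr 1
    apply List.map_congr_left
    intro p hp2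
    have hdp : ds.Pairwise (· ≤ ·) := ((List.pairwise_cons.mp hlt).2).imp le_of_lt
    have hdle : ∀ x ∈ ds, y ≤ x := fun x hx => le_of_lt (hdy x hx)
    have hle := pvRunsGo_fst_le_snd ds y y le_rfl hdp hdle p hp2
    obtain ⟨pa, pb⟩ := p
    exact pvFmtA_eq_fmtB pa pb hle
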